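-- pv_equiv track=rewrite | github.com/DingoRanchLabs/pBot | services/bot/src/bot/__init__.py | was_refused
-- ===== SOURCE A (Python) =====
-- def was_refused(resp):
--     """
--     Returns a bool on whether the response content string was a refusal.
--     """
--
--     problem_substrings = [
--         "Sorry, but I can't",
--         "I'm sorry, but",
--         "I cannot comply",
--         "As an AI developed by OpenAI",
--         "As a large language model",
--         "as a llm",
--         "As an AI language model",
--         "I apologize, but"
--     ]
--
--     for flag in problem_substrings:
--         if flag.lower() in resp.lower():
--             return True
--     return False
-- ===== SOURCE B (Python) =====
-- _PHRASES = (
--     "sorry, but i can't",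
--     "i'm sorry, but",
--     "i cannot comply",
--     "as an ai developed by openai",
--     "as a large language model",
--     "as a llm",
--     "as an ai language model",
--     "i apologize, but",
-- )
--
-- def was_refused(resp):
--     """
--     Returns a bool on whether the response content string was a refusal.
--     Single position-major scan: at each position of the lowered text, test
--     whether any (pre-lowered) refusal phrase starts there.
--     """
--     text = resp.lower()
--     return any(text.startswith(_PHRASES, i) for i in range(len(text) + 1))
-- ===== Notes on version B (the rewrite author's own statement) =====
-- stated objective: alternative
-- what changed: Replaces the phrase-major loop of eight separate substring containment scans with a single position-major sweep over the lowered text that tests the pre-lowered phrase tuple as prefixes at each position via str.startswith with a start index.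
import Mathlib
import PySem

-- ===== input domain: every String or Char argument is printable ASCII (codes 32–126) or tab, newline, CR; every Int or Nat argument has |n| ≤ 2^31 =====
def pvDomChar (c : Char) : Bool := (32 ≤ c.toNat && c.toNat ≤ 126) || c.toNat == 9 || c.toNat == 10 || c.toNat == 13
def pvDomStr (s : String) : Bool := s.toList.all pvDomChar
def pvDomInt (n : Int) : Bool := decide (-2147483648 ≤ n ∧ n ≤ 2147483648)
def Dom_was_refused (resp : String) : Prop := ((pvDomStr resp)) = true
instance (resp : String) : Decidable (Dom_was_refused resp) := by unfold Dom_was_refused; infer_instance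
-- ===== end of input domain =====

-- B replaces A's phrase-major loop of 'substring in text' scans by one position-major
-- sweep testing each pre-lowered phrase as a prefix at every position (objective: alternative).

-- ===== PORT A =====
-- the 'for flag in problem_substrings' loop with its early 'return True'
def refusalLoop (resp : String) : List String → Bool
  | [] => false
  | f :: rest =>
      if PySem.Str.isIn (PySem.Str.lower f) (PySem.Str.lower resp) then true
      else refusalLoop resp rest

def was_refused (resp : String) : Bool :=
  refusalLoop resp
    ["Sorry, but I can't", "I'm sorry, but", "I cannot comply",
     "As an AI developed by OpenAI", "As a large language model",
     "as a llm", "As an AI language model", "I apologize, but"]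

-- ===== PORT B =====
-- the pre-lowered phrase tuple _PHRASES of Source B
def pvPhrases : List (List Char) :=
  ["sorry, but i can't".toList, "i'm sorry, but".toList, "i cannot comply".toList,
   "as an ai developed by openai".toList, "as a large language model".toList,
   "as a llm".toList, "as an ai language model".toList, "i apologize, but".toList]

-- any(text.startswith(_PHRASES, i) for i in range(len(text)+1));
-- text.startswith(p, i) is exact as: p is a prefix of text[i:]
def was_refused_alt (resp : String) : Bool :=
  let text := (PySem.Str.lower resp).toList
  (List.range (text.length + 1)).any (fun i =>
    pvPhrases.any (fun p => PySem.Chars.startswith (text.drop i) p))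

-- ===== PRECONDITION & SPEC =====
def Spec_was_refused (resp : String) (out : Bool) : Prop := out = was_refused_alt resp
instance (resp : String) (out : Bool) : Decidable (Spec_was_refused resp out) := by unfold Spec_was_refused; infer_instance

-- ===== CLAIM (what is proved, stated in full; the proofs are below) =====
def Claim_equal_was_refused : Prop := ∀ (resp : String), Dom_was_refused resp → Spec_was_refused resp (was_refused resp)

-- ===== LEMMAS AND PROOFS =====

theorem refusalLoop_eq_any (resp : String) (l : List String) :
    refusalLoop resp l = l.any (fun f => PySem.Str.isIn (PySem.Str.lower f) (PySem.Str.lower resp)) := by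
  induction l with
  | nil => rfl
  | cons f rest ih =>
      simp only [refusalLoop, List.any_cons, ih]
      cases h : PySem.Str.isIn (PySem.Str.lower f) (PySem.Str.lower resp) <;> simp

theorem any_swap {α β : Type} (l1 : List α) (l2 : List β) (f : α → β → Bool) :
    l1.any (fun a => l2.any (fun b => f a b)) = l2.any (fun b => l1.any (fun a => f a b)) := by
  rw [Bool.eq_iff_iff]
  simp only [List.any_eq_true]
  tauto

theorem any_eq_of_mem {α : Type} (l : List α) (f g : α → Bool)
    (h : ∀ a ∈ l, f a = g a) : l.any f = l.any g := by
  induction l with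
  | nil => rfl
  | cons a rest ih =>
      simp only [List.any_cons, h a (List.mem_cons_self ..),
        ih (fun b hb => h b (List.mem_cons_of_mem a hb))]

theorem range_any_startswith (s sub : List Char) (h : sub ≠ []) :
    (List.range (s.length + 1)).any (fun i => PySem.Chars.startswith (s.drop i) sub)
      = PySem.Chars.isIn sub s := by
  rw [Bool.eq_iff_iff]
  simp only [List.any_eq_true, List.mem_range, PySem.Chars.startswith_iff]
  constructor
  · rintro ⟨i, _, hi⟩
    exact (PySem.Chars.exists_prefix_drop_iff_isIn sub s).mp ⟨i, hi⟩
  · intro hin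
    obtain ⟨j, hj⟩ := (PySem.Chars.exists_prefix_drop_iff_isIn sub s).mpr hin
    have hjle : j ≤ s.length := by
      by_contra hgt
      have hnil : s.drop j = [] := List.drop_eq_nil_of_le (by omega)
      rw [hnil] at hj
      exact h (List.prefix_nil.mp hj)
    exact ⟨j, by omega, hj⟩

-- ===== VERDICT (by name: the statement is the Claim_ definition above) =====
theorem was_refused_spec : Claim_equal_was_refused := by
  intro resp _
  unfold Spec_was_refused was_refused was_refused_alt
  rw [refusalLoop_eq_any, any_swap]
  have h1 : ∀ p ∈ pvPhrases, p ≠ [] := by decide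
  rw [any_eq_of_mem _ _ _ (fun p hp => range_any_startswith _ p (h1 p hp))]
  simp only [pvPhrases, List.any_cons, List.any_nil, PySem.Str.isIn_eq, PySem.Str.toList_lower,
    show PySem.Chars.lower "Sorry, but I can't".toList = "sorry, but i can't".toList from by decide,
    show PySem.Chars.lower "I'm sorry, but".toList = "i'm sorry, but".toList from by decide,
    show PySem.Chars.lower "I cannot comply".toList = "i cannot comply".toList from by decide,
    show PySem.Chars.lower "As an AI developed by OpenAI".toList = "as an ai developed by openai".toList from by decide,
    show PySem.Chars.lower "As a large language model".toList = "as a large language model".toList from by decide,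
    show PySem.Chars.lower "as a llm".toList = "as a llm".toList from by decide,
    show PySem.Chars.lower "As an AI language model".toList = "as an ai language model".toList from by decide,
    show PySem.Chars.lower "I apologize, but".toList = "i apologize, but".toList from by decide]
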